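-- pv_equiv track=rewrite | github.com/prabhatzgit/python_basics | string/maximum_consecutive_repeating_character.py | maximum_consecutive_repeating_character
-- ===== SOURCE A (Python) =====
-- def maximum_consecutive_repeating_character(input_string):
--     length = len(input_string)
--     max_count = 0
--     res = input_string[0]
--
--     # Find the maximum repeating character, starting from s[i]
--
--     for i in range(length):
--         count = 0
--         for j in range(i, length):
--             if input_string[i] != input_string[j]:
--                 break
--             count += 1
--         if count > max_count:
--             max_count = count
--             res = input_string[i]
--
--     return res
-- ===== SOURCE B (Python) =====
-- def maximum_consecutive_repeating_character(input_string):
--     n = len(input_string)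
--     best_count = 0
--     res = input_string[0]
--     i = 0
--     while i < n:
--         j = i + 1
--         while j < n and input_string[j] == input_string[i]:
--             j += 1
--         if j - i > best_count:
--             best_count = j - i
--             res = input_string[i]
--         i = j
--     return res
-- ===== Notes on version B (the rewrite author's own statement) =====
-- stated objective: faster
-- what changed: B replaces A's restart-at-every-index nested scan (a full run re-count from each position) by a single run-skipping pass that jumps from the start of one run to the next, comparing each run length once.
import Mathlib
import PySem

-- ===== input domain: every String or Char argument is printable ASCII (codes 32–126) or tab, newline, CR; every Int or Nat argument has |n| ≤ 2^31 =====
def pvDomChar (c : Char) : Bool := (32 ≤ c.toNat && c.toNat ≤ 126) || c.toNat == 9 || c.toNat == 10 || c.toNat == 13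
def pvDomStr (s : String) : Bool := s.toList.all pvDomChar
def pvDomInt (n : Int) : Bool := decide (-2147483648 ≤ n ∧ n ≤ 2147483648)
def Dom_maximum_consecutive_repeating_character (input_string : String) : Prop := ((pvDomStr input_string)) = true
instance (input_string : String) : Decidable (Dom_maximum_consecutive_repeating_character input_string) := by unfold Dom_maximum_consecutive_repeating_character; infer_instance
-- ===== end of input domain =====

-- B changes the algorithm (single run-skipping pass instead of a re-count from every index);
-- the equivalence below is about the return value on non-empty strings (A raises IndexError on "").

-- ===== PORT A =====
-- inner loop of A: count j from the current position while input_string[j] == input_string[i]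
def pvInnerA (ci : Char) : List Char → Int
  | [] => 0
  | c :: t => if ci ≠ c then 0 else 1 + pvInnerA ci t

-- outer loop of A: for i in range(length), working on the suffix starting at i
def pvOuterA : List Char → Int × String → Int × String
  | [], st => st
  | c :: t, (max_count, res) =>
      let count := pvInnerA c (c :: t)
      pvOuterA t (if count > max_count then (count, String.ofList [c]) else (max_count, res))

def maximum_consecutive_repeating_character (input_string : String) : String :=
  match input_string.toList with
  | [] => ""   -- unreachable under Pre_: Python raises IndexError on input_string[0]
  | c :: t => (pvOuterA (c :: t) (0, String.ofList [c])).2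

-- ===== PORT B =====
-- B's inner while: advance j over the characters equal to the run's first character
def pvCountLead (c : Char) : List Char → Nat
  | [] => 0
  | d :: t => if d = c then pvCountLead c t + 1 else 0

def pvDropLead (c : Char) : List Char → List Char
  | [] => []
  | d :: t => if d = c then pvDropLead c t else d :: t

theorem pvDropLead_length_le (c : Char) (t : List Char) : (pvDropLead c t).length ≤ t.length := by
  induction t with
  | nil => simp [pvDropLead]
  | cons d t ih => by_cases h : d = c <;> simp [pvDropLead, h] <;> omega

-- B's outer while: one step per run, jumping i to j
def pvRunsB : List Char → Int × String → Int × String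
  | [], st => st
  | c :: t, (best_count, res) =>
      let run : Int := 1 + pvCountLead c t
      pvRunsB (pvDropLead c t)
        (if run > best_count then (run, String.ofList [c]) else (best_count, res))
termination_by l => l.length
decreasing_by
  have := pvDropLead_length_le c t
  simp; omega

def maximum_consecutive_repeating_character_alt (input_string : String) : String :=
  match input_string.toList with
  | [] => ""   -- unreachable under Pre_: Python raises IndexError on input_string[0]
  | c :: t => (pvRunsB (c :: t) (0, String.ofList [c])).2

-- ===== PRECONDITION & SPEC =====
-- Pre_ excludes only the empty string, on which A raises IndexError (input_string[0]).
def Pre_maximum_consecutive_repeating_character (input_string : String) : Prop :=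
  input_string ≠ ""
instance (input_string : String) : Decidable (Pre_maximum_consecutive_repeating_character input_string) := by
  unfold Pre_maximum_consecutive_repeating_character; infer_instance

def pvWitness_maximum_consecutive_repeating_character : String := "aabbb"

def Spec_maximum_consecutive_repeating_character (input_string : String) (out : String) : Prop := out = maximum_consecutive_repeating_character_alt input_string
instance (input_string : String) (out : String) : Decidable (Spec_maximum_consecutive_repeating_character input_string out) := by unfold Spec_maximum_consecutive_repeating_character; infer_instance

-- ===== CLAIM (what is proved, stated in full; the proofs are below) =====
def Claim_equal_maximum_consecutive_repeating_character : Prop := ∀ (input_string : String), Dom_maximum_consecutive_repeating_character input_string → Pre_maximum_consecutive_repeating_character input_string → Spec_maximum_consecutive_repeating_character input_string (maximum_consecutive_repeating_character input_string)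

-- ===== LEMMAS AND PROOFS =====

-- A's inner count on a suffix equals B's leading-run count
theorem pvInnerA_eq_countLead (c : Char) (t : List Char) :
    pvInnerA c t = (pvCountLead c t : Int) := by
  induction t with
  | nil => simp [pvInnerA, pvCountLead]
  | cons d t ih =>
    by_cases h : d = c
    · subst h; simp [pvInnerA, pvCountLead, ih]; omega
    · simp [pvInnerA, pvCountLead, h, Ne.symm h]

theorem decomp_lead (c : Char) (t : List Char) :
    List.replicate (pvCountLead c t) c ++ pvDropLead c t = t := by
  induction t with
  | nil => simp [pvCountLead, pvDropLead]
  | cons d t ih =>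
    by_cases h : d = c
    · subst h; simp [pvCountLead, pvDropLead, List.replicate_succ, ih]
    · simp [pvCountLead, pvDropLead, h]

theorem dropLead_head (c : Char) (t : List Char) :
    ∀ d ∈ (pvDropLead c t).head?, d ≠ c := by
  induction t with
  | nil => simp [pvDropLead]
  | cons d t ih =>
    by_cases h : d = c
    · simpa [pvDropLead, h] using ih
    · simp [pvDropLead, h]

theorem inner_on_replicate (c : Char) (j : Nat) (rest : List Char)
    (hrest : ∀ d ∈ rest.head?, d ≠ c) :
    pvInnerA c (List.replicate j c ++ rest) = (j : Int) := by
  induction j with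
  | zero =>
    cases rest with
    | nil => simp [pvInnerA]
    | cons d r =>
      have : d ≠ c := hrest d (by simp)
      simp [pvInnerA, Ne.symm this]
  | succ j ih => simp [List.replicate_succ, pvInnerA, ih]; omega

-- A makes no update while scanning the tail positions of a run already accounted for
theorem pvOuterA_skip (c : Char) (j : Nat) (rest : List Char) (m : Int) (r : String)
    (hrest : ∀ d ∈ rest.head?, d ≠ c) (hm : (j : Int) ≤ m) :
    pvOuterA (List.replicate j c ++ rest) (m, r) = pvOuterA rest (m, r) := by
  induction j generalizing r with
  | zero => simp
  | succ j ih =>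
    have hc : pvInnerA c (c :: (List.replicate j c ++ rest)) = (j : Int) + 1 := by
      have : (c :: (List.replicate j c ++ rest)) = List.replicate (j+1) c ++ rest := by
        simp [List.replicate_succ]
      rw [this, inner_on_replicate c (j+1) rest hrest]; push_cast; ring
    have hnot : ¬ ((j : Int) + 1 > m) := by omega
    rw [List.replicate_succ, List.cons_append]
    simp only [pvOuterA, hc, hnot, if_false]
    exact ih r (by omega)

theorem pvOuterA_eq_pvRunsB (n : Nat) (l : List Char) (hn : l.length ≤ n) (st : Int × String) :
    pvOuterA l st = pvRunsB l st := by
  induction n generalizing l st with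
  | zero =>
    have : l = [] := by cases l <;> simp_all
    subst this; simp [pvOuterA, pvRunsB]
  | succ n ih =>
    cases l with
    | nil => simp [pvOuterA, pvRunsB]
    | cons c t =>
      obtain ⟨m, r⟩ := st
      have hcount : pvInnerA c (c :: t) = 1 + (pvCountLead c t : Int) := by
        simp [pvInnerA, pvInnerA_eq_countLead]
      set k := pvCountLead c t with hk
      set rest := pvDropLead c t with hrest
      have hdec : List.replicate k c ++ rest = t := decomp_lead c t
      have hhd : ∀ d ∈ rest.head?, d ≠ c := dropLead_head c t
      have hlen : rest.length ≤ t.length := pvDropLead_length_le c t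
      set st' := (if 1 + (k : Int) > m then (1 + (k : Int), String.ofList [c]) else (m, r))
        with hst'
      have hA : pvOuterA (c :: t) (m, r) = pvOuterA rest st' := by
        have hge : (k : Int) ≤ st'.1 := by
          rw [hst']; split_ifs with h <;> simp <;> omega
        calc pvOuterA (c :: t) (m, r)
            = pvOuterA t st' := by simp only [pvOuterA, hcount, hst']
          _ = pvOuterA (List.replicate k c ++ rest) st' := by rw [hdec]
          _ = pvOuterA rest st' := by
              obtain ⟨m', r'⟩ := st'
              exact pvOuterA_skip c k rest m' r' hhd (by simpa using hge)
      have hB : pvRunsB (c :: t) (m, r) = pvRunsB rest st' := by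
        simp only [pvRunsB, hst', hk, hrest]
      rw [hA, hB]
      exact ih rest (by simp at hn; omega) st'

-- ===== VERDICT (by name: the statement is the Claim_ definition above) =====
theorem maximum_consecutive_repeating_character_spec : Claim_equal_maximum_consecutive_repeating_character := by
  intro s _ _
  unfold Spec_maximum_consecutive_repeating_character
  unfold maximum_consecutive_repeating_character maximum_consecutive_repeating_character_alt
  cases s.toList with
  | nil => rfl
  | cons c t => simp only [pvOuterA_eq_pvRunsB (c :: t).length (c :: t) le_rfl]
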